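-- pv_equiv track=rewrite | github.com/SNU-SRBL/SoftRobot_sim2real | Code/ModelCalibration_SOFA/plugins/SoftRobots.Inverse/docs/sofapython3/robots_deprecated/PartialRigidification/IntervertebraControllerFull.py | createCylinderSurfaceMesh
-- ===== SOURCE A (Python) =====
-- def createCylinderSurfaceMesh(start, NumPointsOnSection, NumSection):
--
-- 	QuadList= [0]*4*NumPointsOnSection*(NumSection-1)
--
-- 	q=0;
-- 	for s in range(NumSection-1):
-- 		for p in range(NumPointsOnSection-1):
-- 			QuadList[ q   ]= p + s*NumPointsOnSection
-- 			QuadList[ q+1 ]= p+1 + s*NumPointsOnSection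
-- 			QuadList[ q+2 ]= p+1 + (s+1)*NumPointsOnSection
-- 			QuadList[ q+3 ]= p + (s+1)*NumPointsOnSection
-- 			q=q+4
--
--
-- 		# le dernier quad pour "refermer" la section
-- 		QuadList [ q   ] = (NumPointsOnSection-1) + NumPointsOnSection * s
-- 		QuadList [ q+1 ] =  NumPointsOnSection * s
-- 		QuadList [ q+2 ] =  NumPointsOnSection * (s+1)
-- 		QuadList [ q+3 ] = (NumPointsOnSection-1) + NumPointsOnSection * (s+1)
-- 		q=q+4
--
-- 	return QuadList
-- ===== SOURCE B (Python) =====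
-- def createCylinderSurfaceMesh(start, NumPointsOnSection, NumSection):
--     N = NumPointsOnSection
--
--     def corner(i):
--         # decode the flat output index: quad q, corner r, section s, point p
--         q, r = divmod(i, 4)
--         s, p = divmod(q, N)
--         ring = s + 1 if r >= 2 else s
--         pt = p if r in (0, 3) else (p + 1) % N
--         return pt + ring * N
--
--     return [corner(i) for i in range(4 * N * (NumSection - 1))]
-- ===== Notes on version B (the rewrite author's own statement) =====
-- stated objective: alternative
-- what changed: Replaces A's nested section/point loops with their separate seam-closing write block by a single flat comprehension over range(4*N*(S-1)) that computes each output element directly from its flat index via divmod decoding (quad, corner, section, point).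
-- outside the precondition, e.g. on createCylinderSurfaceMesh(0, -2, 0): A returns [], B returns [0, -1, -3, -2, 1, 2, 0, -1]; on createCylinderSurfaceMesh(0, 0, 2): A raises IndexError, B returns []
import Mathlib
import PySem

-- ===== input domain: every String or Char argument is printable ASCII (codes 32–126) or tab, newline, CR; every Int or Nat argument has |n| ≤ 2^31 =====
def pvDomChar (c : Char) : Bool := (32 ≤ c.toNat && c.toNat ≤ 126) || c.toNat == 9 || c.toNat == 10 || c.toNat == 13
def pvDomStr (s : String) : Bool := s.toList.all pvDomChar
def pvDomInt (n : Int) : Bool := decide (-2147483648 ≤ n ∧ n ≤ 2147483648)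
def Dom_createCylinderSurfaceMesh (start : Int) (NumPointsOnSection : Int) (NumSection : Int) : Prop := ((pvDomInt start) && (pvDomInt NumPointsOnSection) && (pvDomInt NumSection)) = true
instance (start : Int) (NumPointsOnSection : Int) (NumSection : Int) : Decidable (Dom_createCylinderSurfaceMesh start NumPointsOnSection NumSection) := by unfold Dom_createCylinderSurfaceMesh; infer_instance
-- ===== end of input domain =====

-- B replaces A's nested quad-emitting loops (with their seam-closing write block) by one flat
-- map over the output indices, decoding each index into (section, point, corner) by divmod
-- (objective: alternative decomposition, same cost).

-- ===== PORT A =====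
-- literal transliteration of A: preallocate [0]*4*N*(S-1) (left-associated, as in Python),
-- fill by index with a write cursor q; inner loop over the first N-1 points, then the four
-- closing writes per section.
def createCylinderSurfaceMesh (start : Int) (NumPointsOnSection : Int) (NumSection : Int) : List Int :=
  let QuadList : List Int :=
    PySem.List.pyRepeat (PySem.List.pyRepeat (PySem.List.pyRepeat [(0 : Int)] 4) NumPointsOnSection) (NumSection - 1)
  let res :=
    (PySem.List.pyRange 0 (NumSection - 1) 1).foldl
      (fun (st : List Int × Int) s =>
        let st2 :=
          (PySem.List.pyRange 0 (NumPointsOnSection - 1) 1).foldl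
            (fun (st : List Int × Int) p =>
              let L := PySem.List.pySetD st.1 st.2 (p + s * NumPointsOnSection)
              let L := PySem.List.pySetD L (st.2 + 1) (p + 1 + s * NumPointsOnSection)
              let L := PySem.List.pySetD L (st.2 + 2) (p + 1 + (s + 1) * NumPointsOnSection)
              let L := PySem.List.pySetD L (st.2 + 3) (p + (s + 1) * NumPointsOnSection)
              (L, st.2 + 4)) st
        let L := PySem.List.pySetD st2.1 st2.2 ((NumPointsOnSection - 1) + NumPointsOnSection * s)
        let L := PySem.List.pySetD L (st2.2 + 1) (NumPointsOnSection * s)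
        let L := PySem.List.pySetD L (st2.2 + 2) (NumPointsOnSection * (s + 1))
        let L := PySem.List.pySetD L (st2.2 + 3) ((NumPointsOnSection - 1) + NumPointsOnSection * (s + 1))
        (L, st2.2 + 4))
      (QuadList, 0)
  res.1

-- ===== PORT B =====
-- B's helper corner(i): Python's divmod is ported as floordiv/mod (exact for nonzero divisor;
-- the divisor N is only reached when the range is nonempty, which Pre_ makes imply N ≥ 1).
def pvCorner (N : Int) (i : Int) : Int :=
  let q := PySem.Int.floordiv i 4
  let r := PySem.Int.mod i 4
  let s := PySem.Int.floordiv q N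
  let p := PySem.Int.mod q N
  let ring := if 2 ≤ r then s + 1 else s
  let pt := if r = 0 ∨ r = 3 then p else PySem.Int.mod (p + 1) N
  pt + ring * N

-- literal transliteration of B: one comprehension over the flat output index range.
def createCylinderSurfaceMesh_alt (start : Int) (NumPointsOnSection : Int) (NumSection : Int) : List Int :=
  (PySem.List.pyRange 0 (4 * NumPointsOnSection * (NumSection - 1)) 1).map (pvCorner NumPointsOnSection)

-- ===== PRECONDITION & SPEC =====
-- Pre_ covers the natural domain NumPointsOnSection ≥ 1 plus the degenerate corners where both
-- programs trivially return []; it excludes the remaining non-positive point counts, where A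
-- either raises IndexError (NumSection ≥ 2: the closing-quad write indexes the empty preallocated
-- list) or returns [] only by the left-associated [0]*4*N list-multiplication accident.
def Pre_createCylinderSurfaceMesh (start : Int) (NumPointsOnSection : Int) (NumSection : Int) : Prop :=
  1 ≤ NumPointsOnSection ∨ NumSection = 1 ∨ (NumPointsOnSection = 0 ∧ NumSection ≤ 1)
instance (start : Int) (NumPointsOnSection : Int) (NumSection : Int) : Decidable (Pre_createCylinderSurfaceMesh start NumPointsOnSection NumSection) := by unfold Pre_createCylinderSurfaceMesh; infer_instance
def pvWitness_createCylinderSurfaceMesh : Int × Int × Int := (0, 3, 3)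

def Spec_createCylinderSurfaceMesh (start : Int) (NumPointsOnSection : Int) (NumSection : Int) (out : List Int) : Prop := out = createCylinderSurfaceMesh_alt start NumPointsOnSection NumSection
instance (start : Int) (NumPointsOnSection : Int) (NumSection : Int) (out : List Int) : Decidable (Spec_createCylinderSurfaceMesh start NumPointsOnSection NumSection out) := by unfold Spec_createCylinderSurfaceMesh; infer_instance

-- ===== CLAIM (what is proved, stated in full; the proofs are below) =====
def Claim_equal_createCylinderSurfaceMesh : Prop := ∀ (start : Int) (NumPointsOnSection : Int) (NumSection : Int), Dom_createCylinderSurfaceMesh start NumPointsOnSection NumSection → Pre_createCylinderSurfaceMesh start NumPointsOnSection NumSection → Spec_createCylinderSurfaceMesh start NumPointsOnSection NumSection (createCylinderSurfaceMesh start NumPointsOnSection NumSection)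

-- ===== LEMMAS AND PROOFS =====

-- the quads of one section, in A's (and B's) emission order
def pvSec (N s : Int) : List Int :=
  (PySem.List.pyRange 0 N 1).flatMap
    (fun p => [p + s * N, PySem.Int.mod (p + 1) N + s * N,
               PySem.Int.mod (p + 1) N + (s + 1) * N, p + (s + 1) * N])

lemma pvRepeat_replicate (a : Int) (m : Nat) (n : Int) :
    PySem.List.pyRepeat (List.replicate m a) n = List.replicate (n.toNat * m) a := by
  simp [PySem.List.pyRepeat]

lemma pvFlatMap_congr {α β : Type} (l : List α) (f g : α → List β)
    (h : ∀ a ∈ l, f a = g a) : l.flatMap f = l.flatMap g := by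
  induction l with
  | nil => rfl
  | cons x xs ih =>
    simp only [List.flatMap_cons]
    rw [h x (by simp), ih (fun a ha => h a (by simp [ha]))]

-- one in-range write: pySetD at index pre.length + k
lemma pvSetD_at (pre t : List Int) (k : Nat) (v : Int) (hk : k < t.length) :
    PySem.List.pySetD (pre ++ t) ((pre.length : Int) + k) v = pre ++ t.set k v := by
  rw [PySem.List.pySetD_of_nonneg _ v (by positivity),
      show ((pre.length : Int) + k).toNat = pre.length + k from by omega,
      List.set_append, if_neg (by omega), Nat.add_sub_cancel_left]

-- writing one quad into four leading zeros
lemma pvWrite4 (pre rest : List Int) (v0 v1 v2 v3 : Int) :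
    (PySem.List.pySetD
      (PySem.List.pySetD
        (PySem.List.pySetD
          (PySem.List.pySetD (pre ++ 0 :: 0 :: 0 :: 0 :: rest) (pre.length : Int) v0)
          ((pre.length : Int) + 1) v1)
        ((pre.length : Int) + 2) v2)
      ((pre.length : Int) + 3) v3) = pre ++ v0 :: v1 :: v2 :: v3 :: rest := by
  have h0 : PySem.List.pySetD (pre ++ 0 :: 0 :: 0 :: 0 :: rest) (pre.length : Int) v0
      = pre ++ v0 :: 0 :: 0 :: 0 :: rest := by
    exact_mod_cast pvSetD_at pre (0 :: 0 :: 0 :: 0 :: rest) 0 v0 (by simp)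
  have h1 : PySem.List.pySetD (pre ++ v0 :: 0 :: 0 :: 0 :: rest) ((pre.length : Int) + 1) v1
      = pre ++ v0 :: v1 :: 0 :: 0 :: rest := by
    exact_mod_cast pvSetD_at pre (v0 :: 0 :: 0 :: 0 :: rest) 1 v1 (by simp)
  have h2 : PySem.List.pySetD (pre ++ v0 :: v1 :: 0 :: 0 :: rest) ((pre.length : Int) + 2) v2
      = pre ++ v0 :: v1 :: v2 :: 0 :: rest := by
    exact_mod_cast pvSetD_at pre (v0 :: v1 :: 0 :: 0 :: rest) 2 v2 (by simp)
  have h3 : PySem.List.pySetD (pre ++ v0 :: v1 :: v2 :: 0 :: rest) ((pre.length : Int) + 3) v3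
      = pre ++ v0 :: v1 :: v2 :: v3 :: rest := by
    exact_mod_cast pvSetD_at pre (v0 :: v1 :: v2 :: 0 :: rest) 3 v3 (by simp)
  rw [h0, h1, h2, h3]

-- the inner loop of A fills 4·n zeros with the first N-1 quads of a section
lemma pvInnerA (N s : Int) : ∀ (n : Nat) (a : Int), 0 ≤ a → a + n = N - 1 →
    ∀ (pre rest : List Int),
    (PySem.List.pyRange a (N - 1) 1).foldl
      (fun (st : List Int × Int) p =>
        let L := PySem.List.pySetD st.1 st.2 (p + s * N)
        let L := PySem.List.pySetD L (st.2 + 1) (p + 1 + s * N)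
        let L := PySem.List.pySetD L (st.2 + 2) (p + 1 + (s + 1) * N)
        let L := PySem.List.pySetD L (st.2 + 3) (p + (s + 1) * N)
        (L, st.2 + 4))
      (pre ++ List.replicate (4 * n) 0 ++ rest, (pre.length : Int))
    = (pre ++ (PySem.List.pyRange a (N - 1) 1).flatMap
          (fun p => [p + s * N, p + 1 + s * N, p + 1 + (s + 1) * N, p + (s + 1) * N]) ++ rest,
       (pre.length : Int) + 4 * n) := by
  intro n
  induction n with
  | zero =>
    intro a ha hn pre rest
    rw [PySem.List.pyRange_one_eq_nil (by omega)]
    simp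
  | succ m ih =>
    intro a ha hn pre rest
    rw [PySem.List.pyRange_one_cons (by omega)]
    simp only [List.foldl_cons, List.flatMap_cons]
    have hrep : List.replicate (4 * (m + 1)) (0 : Int) = 0 :: 0 :: 0 :: 0 :: List.replicate (4 * m) 0 := by
      rw [show 4 * (m + 1) = 4 + 4 * m from by omega, List.replicate_add]
      rfl
    rw [hrep]
    have hw := pvWrite4 pre (List.replicate (4 * m) 0 ++ rest)
      (a + s * N) (a + 1 + s * N) (a + 1 + (s + 1) * N) (a + (s + 1) * N)
    have hih := ih (a + 1) (by omega) (by omega)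
      (pre ++ [a + s * N, a + 1 + s * N, a + 1 + (s + 1) * N, a + (s + 1) * N]) rest
    simp only [List.append_assoc, List.cons_append, List.nil_append, List.length_append,
      List.length_cons, List.length_nil, Nat.cast_add, Nat.cast_ofNat, Nat.cast_zero,
      Nat.cast_one] at hw hih ⊢
    rw [hw]
    rw [show ((pre.length : Int) + (0 + 1 + 1 + 1 + 1)) = (pre.length : Int) + 4 from by ring] at hih
    rw [hih]
    simp only [Prod.mk.injEq]
    exact ⟨trivial, by push_cast; ring⟩

-- length bookkeeping for the emitted quads
lemma pvLen_flatMap4 (l : List Int) (f0 f1 f2 f3 : Int → Int) :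
    (l.flatMap (fun p => [f0 p, f1 p, f2 p, f3 p])).length = 4 * l.length := by
  induction l with
  | nil => rfl
  | cons x xs ih => simp [ih]; ring

-- A's outer-loop body, named for the proofs (definitionally the lambda in port A)
def pvBody (N : Int) : List Int × Int → Int → List Int × Int :=
  fun st s =>
    let st2 :=
      (PySem.List.pyRange 0 (N - 1) 1).foldl
        (fun (st : List Int × Int) p =>
          let L := PySem.List.pySetD st.1 st.2 (p + s * N)
          let L := PySem.List.pySetD L (st.2 + 1) (p + 1 + s * N)
          let L := PySem.List.pySetD L (st.2 + 2) (p + 1 + (s + 1) * N)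
          let L := PySem.List.pySetD L (st.2 + 3) (p + (s + 1) * N)
          (L, st.2 + 4)) st
    let L := PySem.List.pySetD st2.1 st2.2 ((N - 1) + N * s)
    let L := PySem.List.pySetD L (st2.2 + 1) (N * s)
    let L := PySem.List.pySetD L (st2.2 + 2) (N * (s + 1))
    let L := PySem.List.pySetD L (st2.2 + 3) ((N - 1) + N * (s + 1))
    (L, st2.2 + 4)

-- one full outer-loop step of A appends exactly pvSec N s
lemma pvSectionA (N s : Int) (hN : 1 ≤ N) (pre rest : List Int) :
    pvBody N (pre ++ List.replicate ((4 * N).toNat) 0 ++ rest, (pre.length : Int)) s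
    = (pre ++ pvSec N s ++ rest, (pre.length : Int) + 4 * N) := by
  simp only [pvBody]
  have hrep : List.replicate ((4 * N).toNat) (0 : Int)
      = List.replicate (4 * (N - 1).toNat) 0 ++ [0, 0, 0, 0] := by
    rw [show [0, 0, 0, 0] = List.replicate 4 (0 : Int) from rfl, ← List.replicate_add]
    congr 1
    omega
  simp only [hrep]
  have hinner := pvInnerA N s (N - 1).toNat 0 le_rfl (by omega) pre ([0, 0, 0, 0] ++ rest)
  simp only [List.append_assoc, List.cons_append, List.nil_append] at hinner ⊢
  rw [hinner]
  set F := (PySem.List.pyRange 0 (N - 1) 1).flatMap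
      (fun p => [p + s * N, p + 1 + s * N, p + 1 + (s + 1) * N, p + (s + 1) * N]) with hF
  have hFlen : F.length = 4 * (N - 1).toNat := by
    rw [hF, pvLen_flatMap4, PySem.List.length_pyRange_one]
    omega
  have hidx : (pre.length : Int) + 4 * ((N - 1).toNat : Int) = ((pre ++ F).length : Int) := by
    have h : (pre ++ F).length = pre.length + 4 * (N - 1).toNat := by simp [hFlen]
    rw [h]
    omega
  have hw := pvWrite4 (pre ++ F) rest ((N - 1) + N * s) (N * s) (N * (s + 1)) ((N - 1) + N * (s + 1))
  simp only [List.append_assoc] at hw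
  rw [hidx, hw]
  have hsec : pvSec N s
      = F ++ [(N - 1) + N * s, N * s, N * (s + 1), (N - 1) + N * (s + 1)] := by
    rw [pvSec, PySem.List.pyRange_one_append 0 (N - 1) N (by omega) (by omega),
        List.flatMap_append, hF]
    congr 1
    · apply pvFlatMap_congr
      intro p hp
      rw [PySem.List.mem_pyRange_one] at hp
      rw [PySem.Int.mod_eq_emod_of_pos (by omega : (0:Int) < N),
          Int.emod_eq_of_lt (by omega) (by omega)]
    · rw [show PySem.List.pyRange (N - 1) N 1 = [N - 1] from by
          have h := PySem.List.pyRange_one_singleton (N - 1)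
          rw [show N - 1 + 1 = N from by ring] at h
          exact h,
        List.flatMap_cons, List.flatMap_nil,
        PySem.Int.mod_eq_emod_of_pos (by omega : (0:Int) < N),
        show N - 1 + 1 = N from by ring, Int.emod_self]
      simp only [List.append_nil, List.cons.injEq, and_true]
      exact ⟨by ring, by ring, by ring, by ring⟩
  rw [show pvSec N s ++ rest
      = F ++ ((N - 1) + N * s) :: (N * s) :: (N * (s + 1)) :: ((N - 1) + N * (s + 1)) :: rest from by
        rw [hsec]; simp]
  simp only [Prod.mk.injEq]
  constructor
  · simp
  · have h : ((pre ++ F).length : Int) = (pre.length : Int) + 4 * ((N - 1).toNat : Int) := hidx.symm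
    rw [h]
    omega

-- the outer loop of A over any s-range
lemma pvOuterA (N : Int) (hN : 1 ≤ N) : ∀ (k : Nat) (a b : Int), a + k = b →
    ∀ (pre : List Int),
    List.foldl (pvBody N) (pre ++ List.replicate (k * (4 * N).toNat) 0, (pre.length : Int))
      (PySem.List.pyRange a b 1)
    = (pre ++ (PySem.List.pyRange a b 1).flatMap (pvSec N), (pre.length : Int) + k * (4 * N)) := by
  intro k
  induction k with
  | zero =>
    intro a b hab pre
    rw [PySem.List.pyRange_one_eq_nil (show b ≤ a from by omega)]
    simp
  | succ m ih =>
    intro a b hab pre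
    rw [PySem.List.pyRange_one_cons (show a < b from by omega)]
    simp only [List.foldl_cons, List.flatMap_cons]
    have hrep : List.replicate ((m + 1) * (4 * N).toNat) (0 : Int)
        = List.replicate ((4 * N).toNat) 0 ++ List.replicate (m * (4 * N).toNat) 0 := by
      rw [← List.replicate_add]
      congr 1
      ring
    rw [hrep, ← List.append_assoc,
        pvSectionA N a hN pre (List.replicate (m * (4 * N).toNat) 0)]
    have hlen : (pvSec N a).length = (4 * N).toNat := by
      rw [pvSec, pvLen_flatMap4, PySem.List.length_pyRange_one]
      omega
    have hih := ih (a + 1) b (by omega) (pre ++ pvSec N a)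
    rw [show ((((pre ++ pvSec N a).length) : Nat) : Int) = (pre.length : Int) + 4 * N from by
        rw [List.length_append, hlen]; omega] at hih
    rw [hih]
    simp only [Prod.mk.injEq]
    constructor
    · simp
    · push_cast
      ring

-- B's corner decoder evaluated at a structured index 4*(N*s+p)+r
lemma pvCorner_eval (N s p r : Int) (hN : 1 ≤ N) (hs : 0 ≤ s) (hp : 0 ≤ p) (hpN : p < N)
    (hr0 : 0 ≤ r) (hr4 : r < 4) :
    pvCorner N (4 * (N * s + p) + r)
    = (if r = 0 ∨ r = 3 then p else PySem.Int.mod (p + 1) N)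
      + (if 2 ≤ r then s + 1 else s) * N := by
  have h4 : PySem.Int.floordiv (4 * (N * s + p) + r) 4 = N * s + p := by
    rw [PySem.Int.floordiv_eq_iff_of_pos (by norm_num)]
    constructor <;> linarith
  have hm4 : PySem.Int.mod (4 * (N * s + p) + r) 4 = r := by
    have h := PySem.Int.floordiv_mul_add_mod (4 * (N * s + p) + r) 4
    rw [h4] at h
    linarith
  have hc : s * N = N * s := mul_comm s N
  have hd : (s + 1) * N = N * s + N := by ring
  have hq : PySem.Int.floordiv (N * s + p) N = s := by
    rw [PySem.Int.floordiv_eq_iff_of_pos (by omega)]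
    constructor <;> linarith
  have hmq : PySem.Int.mod (N * s + p) N = p := by
    have h := PySem.Int.floordiv_mul_add_mod (N * s + p) N
    rw [hq] at h
    linarith
  simp only [pvCorner, h4, hm4, hq, hmq]

-- one section's worth of B's flat map equals the section quads
lemma pvBlockMap (N s : Int) (hN : 1 ≤ N) (hs : 0 ≤ s) :
    ∀ (k : Nat) (p0 : Int), 0 ≤ p0 → p0 + k = N →
    (PySem.List.pyRange (4 * (N * s + p0)) (4 * (N * s + N)) 1).map (pvCorner N)
    = (PySem.List.pyRange p0 N 1).flatMap
        (fun p => [p + s * N, PySem.Int.mod (p + 1) N + s * N,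
                   PySem.Int.mod (p + 1) N + (s + 1) * N, p + (s + 1) * N]) := by
  intro k
  induction k with
  | zero =>
    intro p0 hp0 hk
    have hEq : p0 = N := by omega
    subst hEq
    rw [PySem.List.pyRange_one_eq_nil le_rfl, PySem.List.pyRange_one_eq_nil le_rfl]
    rfl
  | succ m ih =>
    intro p0 hp0 hk
    have hpN : p0 < N := by omega
    rw [PySem.List.pyRange_one_cons (show 4 * (N * s + p0) < 4 * (N * s + N) from by linarith),
        PySem.List.pyRange_one_cons (show 4 * (N * s + p0) + 1 < 4 * (N * s + N) from by linarith),
        PySem.List.pyRange_one_cons (show 4 * (N * s + p0) + 1 + 1 < 4 * (N * s + N) from by linarith),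
        PySem.List.pyRange_one_cons (show 4 * (N * s + p0) + 1 + 1 + 1 < 4 * (N * s + N) from by linarith),
        show 4 * (N * s + p0) + 1 + 1 + 1 + 1 = 4 * (N * s + (p0 + 1)) from by ring]
    simp only [List.map_cons]
    rw [ih (p0 + 1) (by omega) (by omega),
        PySem.List.pyRange_one_cons hpN, List.flatMap_cons]
    have e0 : pvCorner N (4 * (N * s + p0)) = p0 + s * N := by
      have h := pvCorner_eval N s p0 0 hN hs hp0 hpN le_rfl (by norm_num)
      norm_num at h
      exact h
    have e1 : pvCorner N (4 * (N * s + p0) + 1) = PySem.Int.mod (p0 + 1) N + s * N := by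
      have h := pvCorner_eval N s p0 1 hN hs hp0 hpN (by norm_num) (by norm_num)
      norm_num at h
      exact h
    have e2 : pvCorner N (4 * (N * s + p0) + 1 + 1) = PySem.Int.mod (p0 + 1) N + (s + 1) * N := by
      have h := pvCorner_eval N s p0 2 hN hs hp0 hpN (by norm_num) (by norm_num)
      norm_num at h
      rw [show 4 * (N * s + p0) + 1 + 1 = 4 * (N * s + p0) + 2 from by ring]
      exact h
    have e3 : pvCorner N (4 * (N * s + p0) + 1 + 1 + 1) = p0 + (s + 1) * N := by
      have h := pvCorner_eval N s p0 3 hN hs hp0 hpN (by norm_num) (by norm_num)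
      norm_num at h
      rw [show 4 * (N * s + p0) + 1 + 1 + 1 = 4 * (N * s + p0) + 3 from by ring]
      exact h
    rw [e0, e1, e2, e3]
    rfl

-- B's whole flat map decomposes into the per-section quad lists
lemma pvOuterB (N : Int) (hN : 1 ≤ N) (S : Int) :
    ∀ (k : Nat) (s0 : Int), 0 ≤ s0 → s0 + k = S - 1 →
    (PySem.List.pyRange (4 * (N * s0)) (4 * (N * (S - 1))) 1).map (pvCorner N)
    = (PySem.List.pyRange s0 (S - 1) 1).flatMap (pvSec N) := by
  intro k
  induction k with
  | zero =>
    intro s0 hs0 hk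
    have hEq : s0 = S - 1 := by omega
    subst hEq
    rw [PySem.List.pyRange_one_eq_nil le_rfl, PySem.List.pyRange_one_eq_nil le_rfl]
    rfl
  | succ m ih =>
    intro s0 hs0 hk
    have h1 : 4 * (N * s0) ≤ 4 * (N * (s0 + 1)) := by nlinarith
    have h2 : 4 * (N * (s0 + 1)) ≤ 4 * (N * (S - 1)) := by
      have hmul : N * (s0 + 1) ≤ N * (S - 1) :=
        mul_le_mul_of_nonneg_left (by omega) (by omega)
      linarith
    rw [PySem.List.pyRange_one_append (4 * (N * s0)) (4 * (N * (s0 + 1))) (4 * (N * (S - 1))) h1 h2,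
        List.map_append,
        PySem.List.pyRange_one_cons (show s0 < S - 1 from by omega), List.flatMap_cons,
        ih (s0 + 1) (by omega) (by omega)]
    have hblock := pvBlockMap N s0 hN hs0 N.toNat 0 le_rfl (by omega)
    rw [show (4 * (N * s0 + 0) : Int) = 4 * (N * s0) from by ring,
        show (4 * (N * s0 + N) : Int) = 4 * (N * (s0 + 1)) from by ring] at hblock
    rw [hblock]
    rfl

-- ===== VERDICT =====
theorem createCylinderSurfaceMesh_spec : Claim_equal_createCylinderSurfaceMesh := by
  intro start N S _ hpre
  replace hpre : 1 ≤ N ∨ S = 1 ∨ (N = 0 ∧ S ≤ 1) := hpre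
  unfold Spec_createCylinderSurfaceMesh
  simp only [createCylinderSurfaceMesh, createCylinderSurfaceMesh_alt]
  by_cases hS : S ≤ 1
  · have h0 : 4 * N * (S - 1) ≤ 0 := by
      rcases hpre with h | h | ⟨h1, _⟩
      · exact mul_nonpos_of_nonneg_of_nonpos (by omega) (by omega)
      · rw [show S - 1 = (0 : Int) from by omega]
        simp
      · rw [h1]
        simp
    rw [PySem.List.pyRange_one_eq_nil (show S - 1 ≤ 0 from by omega),
        PySem.List.pyRange_one_eq_nil h0]
    simp [PySem.List.pyRepeat, show (S - 1).toNat = 0 from by omega]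
  · have hN : 1 ≤ N := by rcases hpre with h | h | ⟨h1, h2⟩ <;> omega
    have hQ : PySem.List.pyRepeat (PySem.List.pyRepeat (PySem.List.pyRepeat [(0 : Int)] 4) N) (S - 1)
        = List.replicate ((S - 1).toNat * (4 * N).toNat) 0 := by
      rw [PySem.List.pyRepeat_singleton, show ((4 : Int)).toNat = 4 from rfl,
          pvRepeat_replicate, pvRepeat_replicate,
          show N.toNat * 4 = (4 * N).toNat from by omega]
    rw [hQ]
    have hA : (fun (st : List Int × Int) s =>
        let st2 :=
          (PySem.List.pyRange 0 (N - 1) 1).foldl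
            (fun (st : List Int × Int) p =>
              let L := PySem.List.pySetD st.1 st.2 (p + s * N)
              let L := PySem.List.pySetD L (st.2 + 1) (p + 1 + s * N)
              let L := PySem.List.pySetD L (st.2 + 2) (p + 1 + (s + 1) * N)
              let L := PySem.List.pySetD L (st.2 + 3) (p + (s + 1) * N)
              (L, st.2 + 4)) st
        let L := PySem.List.pySetD st2.1 st2.2 ((N - 1) + N * s)
        let L := PySem.List.pySetD L (st2.2 + 1) (N * s)
        let L := PySem.List.pySetD L (st2.2 + 2) (N * (s + 1))
        let L := PySem.List.pySetD L (st2.2 + 3) ((N - 1) + N * (s + 1))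
        (L, st2.2 + 4)) = pvBody N := rfl
    rw [hA]
    have houter := pvOuterA N hN (S - 1).toNat 0 (S - 1) (by omega) []
    simp only [List.nil_append, List.length_nil, Nat.cast_zero] at houter
    rw [houter]
    have hB := pvOuterB N hN S (S - 1).toNat 0 le_rfl (by omega)
    rw [show (4 * (N * (0 : Int)) : Int) = 0 from by ring,
        show (4 * (N * (S - 1)) : Int) = 4 * N * (S - 1) from by ring] at hB
    rw [hB]
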